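-- pv_equiv track=rewrite | github.com/alexandraback/datacollection | solutions_5644738749267968_0/Python/Fettn/solve.py | search_d_stone
-- ===== SOURCE A (Python) =====
-- def search_d_stone(naomi_stone, ken_stones):
--     old_stone = None
--     for ken_stone in ken_stones:
--         if naomi_stone > ken_stone:
--             old_stone = ken_stone
--     if old_stone:
--         return old_stone
--     else:
--         return ken_stones[-1]
-- ===== SOURCE B (Python) =====
-- def search_d_stone(naomi_stone, ken_stones):
--     old_stone = None
--     for ken_stone in reversed(ken_stones):
--         if naomi_stone > ken_stone:
--             old_stone = ken_stone
--             break
--     if old_stone: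
--         return old_stone
--     else:
--         return ken_stones[-1]
-- ===== Notes on version B (the rewrite author's own statement) =====
-- stated objective: alternative
-- what changed: B scans ken_stones back-to-front and stops at the first stone smaller than naomi's (early break), instead of A's full forward pass that keeps overwriting old_stone.
-- outside the precondition, e.g. on search_d_stone(5, []): A raises IndexError, B raises IndexError
import Mathlib
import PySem

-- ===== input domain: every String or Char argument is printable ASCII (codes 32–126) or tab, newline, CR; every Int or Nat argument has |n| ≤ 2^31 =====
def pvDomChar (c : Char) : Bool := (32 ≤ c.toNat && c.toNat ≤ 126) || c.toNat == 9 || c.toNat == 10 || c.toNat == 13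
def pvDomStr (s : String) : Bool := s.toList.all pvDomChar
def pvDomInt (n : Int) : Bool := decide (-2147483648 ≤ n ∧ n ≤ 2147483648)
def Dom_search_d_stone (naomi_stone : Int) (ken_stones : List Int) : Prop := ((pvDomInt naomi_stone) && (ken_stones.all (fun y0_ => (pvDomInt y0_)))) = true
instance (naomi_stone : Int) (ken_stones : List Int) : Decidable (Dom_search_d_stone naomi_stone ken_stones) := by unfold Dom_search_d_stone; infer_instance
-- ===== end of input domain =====

-- B scans the list back-to-front with an early stop instead of A's full forward pass; equivalence proved for nonempty lists (A raises IndexError on []).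


-- ===== PORT A =====
-- forward loop: old_stone ends as the LAST ken_stone with naomi_stone > ken_stone
def search_d_stone (naomi_stone : Int) (ken_stones : List Int) : Int :=
  let old_stone : Option Int :=
    ken_stones.foldl (fun acc ken_stone => if naomi_stone > ken_stone then some ken_stone else acc) none
  -- `if old_stone:` — truthy iff some nonzero value
  if old_stone.getD 0 ≠ 0 then old_stone.getD 0
  else (PySem.List.pyGet? ken_stones (-1)).getD 0   -- none (IndexError on []) excluded by Pre_

-- ===== PORT B =====
-- reverse loop with break: first stone of the reversed list with naomi_stone > ken_stone
def pvFirstLess (naomi_stone : Int) : List Int → Option Int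
  | [] => none
  | ken_stone :: rest =>
    if naomi_stone > ken_stone then some ken_stone else pvFirstLess naomi_stone rest

def search_d_stone_alt (naomi_stone : Int) (ken_stones : List Int) : Int :=
  let old_stone : Option Int := pvFirstLess naomi_stone ken_stones.reverse
  if old_stone.getD 0 ≠ 0 then old_stone.getD 0
  else (PySem.List.pyGet? ken_stones (-1)).getD 0   -- none (IndexError on []) excluded by Pre_

-- ===== PRECONDITION & SPEC =====
-- Pre_ excludes only the empty list, on which both Pythons raise IndexError at ken_stones[-1]
def Pre_search_d_stone (_naomi_stone : Int) (ken_stones : List Int) : Prop := ken_stones ≠ []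
instance (naomi_stone : Int) (ken_stones : List Int) : Decidable (Pre_search_d_stone naomi_stone ken_stones) := by unfold Pre_search_d_stone; infer_instance
def pvWitness_search_d_stone : Int × List Int := (5, [1, 7, 2])

def Spec_search_d_stone (naomi_stone : Int) (ken_stones : List Int) (out : Int) : Prop := out = search_d_stone_alt naomi_stone ken_stones
instance (naomi_stone : Int) (ken_stones : List Int) (out : Int) : Decidable (Spec_search_d_stone naomi_stone ken_stones out) := by unfold Spec_search_d_stone; infer_instance

-- ===== CLAIM (what is proved, stated in full; the proofs are below) =====
def Claim_equal_search_d_stone : Prop := ∀ (naomi_stone : Int) (ken_stones : List Int), Dom_search_d_stone naomi_stone ken_stones → Pre_search_d_stone naomi_stone ken_stones → Spec_search_d_stone naomi_stone ken_stones (search_d_stone naomi_stone ken_stones)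

-- ===== LEMMAS AND PROOFS =====
theorem pvFirstLess_append (n : Int) (xs ys : List Int) :
    pvFirstLess n (xs ++ ys) = (pvFirstLess n xs).or (pvFirstLess n ys) := by
  induction xs with
  | nil => rfl
  | cons k rest ih =>
    simp only [List.cons_append, pvFirstLess]
    by_cases h : n > k <;> simp [h, ih]

theorem pvFold_eq_firstLess_rev (n : Int) (ks : List Int) (acc : Option Int) :
    ks.foldl (fun a k => if n > k then some k else a) acc = (pvFirstLess n ks.reverse).or acc := by
  induction ks generalizing acc with
  | nil => rfl
  | cons k rest ih =>
    simp only [List.foldl_cons, List.reverse_cons, ih, pvFirstLess_append]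
    by_cases h : n > k <;> simp [pvFirstLess, h]

-- ===== VERDICT (by name: the statement is the Claim_ definition above) =====
theorem search_d_stone_spec : Claim_equal_search_d_stone := by
  intro n ks _ _
  unfold Spec_search_d_stone search_d_stone search_d_stone_alt
  simp [pvFold_eq_firstLess_rev]
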